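-- pv_equiv track=rewrite | github.com/AkhilTrc/semantic-selection-agent | trial_V4.py | top_pairs_by_empowerment
-- ===== SOURCE A (Python) =====
-- from typing import Callable, Dict, Iterable, List, Optional, Sequence, Set, Tuple, Any
-- from collections import deque
--
-- Pair = Tuple[str, str]
--
-- def _canon_pair(a: str, b: str, ordered: bool=False) -> Pair:
--     a, b = a.strip(), b.strip()
--     return (a, b) if ordered else tuple(sorted((a, b)))
--
-- def pair_empowerment(pair: Pair, inventory_set: Set[str], rules_lookup: Dict[Pair, List[str]], depth: int=2) -> int:
--     if pair not in rules_lookup: return 0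
--     start_new = [x for x in rules_lookup[pair] if x not in inventory_set]
--     if depth <= 1: return len(start_new)
--     seen = set(inventory_set) | set(start_new)
--     frontier = deque(start_new)
--     for _ in range(depth-1):
--         nxt = []
--         while frontier:
--             x = frontier.popleft()
--             for (a,b), outs in rules_lookup.items():
--                 if x in (a,b):
--                     for r in outs:
--                         if r not in seen:
--                             seen.add(r); nxt.append(r)
--         if not nxt: break
--         frontier = deque(nxt)
--     return max(0, len(seen) - len(inventory_set))
--
-- def top_pairs_by_empowerment(inventory: Sequence[str], tried_combos: Set[Pair], rules_lookup: Dict[Pair, List[str]], top_k: int=8, depth: int=2) -> List[Pair]: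
--     inv = list(inventory)
--     tried = set(tried_combos)
--     scored = []
--     inv_set = set(inv)
--     for i in range(len(inv)):
--         for j in range(i+1, len(inv)):
--             p = _canon_pair(inv[i], inv[j])
--             if p in tried: continue
--             s = pair_empowerment(p, inv_set, rules_lookup, depth=depth)
--             if s > 0: scored.append((s, p))
--     scored.sort(key=lambda t: t[0], reverse=True)
--     return [p for _, p in scored[:top_k]]
-- ===== SOURCE B (Python) =====
-- def top_pairs_by_empowerment(inventory, tried_combos, rules_lookup, top_k=8, depth=2):
--     inv = list(inventory)
--     inv_set = set(inv)
--     tried = set(tried_combos)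
--     # element -> list of result-lists of the rules it appears in (built once)
--     incident = {}
--     for (a, b), outs in rules_lookup.items():
--         incident.setdefault(a, []).append(outs)
--         if b != a:
--             incident.setdefault(b, []).append(outs)
--
--     def empowerment(p):
--         outs = rules_lookup.get(p)
--         if outs is None:
--             return 0
--         start = [x for x in outs if x not in inv_set]
--         if depth <= 1:
--             return len(start)
--         seen = inv_set | set(start)
--         frontier = start
--         steps = depth - 1
--         while steps > 0 and frontier:
--             flat = [r for x in frontier for outs2 in incident.get(x, []) for r in outs2]
--             layer = []
--             for r in flat:
--                 if r not in seen and r not in layer: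
--                     layer.append(r)
--             seen |= set(layer)
--             frontier = layer
--             steps -= 1
--         return len(seen) - len(inv_set)
--
--     scored = []
--     for i, x in enumerate(inv):
--         for y in inv[i + 1:]:
--             a, b = x.strip(), y.strip()
--             p = (min(a, b), max(a, b))
--             if p not in tried:
--                 s = empowerment(p)
--                 if s > 0:
--                     scored.append((s, p))
--     scored.sort(key=lambda t: -t[0])
--     return [p for _, p in scored[:top_k]]
-- ===== Notes on version B (the rewrite author's own statement) =====
-- stated objective: alternative
-- what changed: B precomputes an element-to-incident-rule-outputs index once and expands each BFS layer as a staged gather-then-dedup pass over that index (A rescans the whole ruleset per popped frontier element), enumerates pairs by enumerate+slicing instead of index ranges, canonicalises with min/max instead of sorted, drops the redundant max(0,.), and sorts by negated score instead of reverse=True.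
import Mathlib
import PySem

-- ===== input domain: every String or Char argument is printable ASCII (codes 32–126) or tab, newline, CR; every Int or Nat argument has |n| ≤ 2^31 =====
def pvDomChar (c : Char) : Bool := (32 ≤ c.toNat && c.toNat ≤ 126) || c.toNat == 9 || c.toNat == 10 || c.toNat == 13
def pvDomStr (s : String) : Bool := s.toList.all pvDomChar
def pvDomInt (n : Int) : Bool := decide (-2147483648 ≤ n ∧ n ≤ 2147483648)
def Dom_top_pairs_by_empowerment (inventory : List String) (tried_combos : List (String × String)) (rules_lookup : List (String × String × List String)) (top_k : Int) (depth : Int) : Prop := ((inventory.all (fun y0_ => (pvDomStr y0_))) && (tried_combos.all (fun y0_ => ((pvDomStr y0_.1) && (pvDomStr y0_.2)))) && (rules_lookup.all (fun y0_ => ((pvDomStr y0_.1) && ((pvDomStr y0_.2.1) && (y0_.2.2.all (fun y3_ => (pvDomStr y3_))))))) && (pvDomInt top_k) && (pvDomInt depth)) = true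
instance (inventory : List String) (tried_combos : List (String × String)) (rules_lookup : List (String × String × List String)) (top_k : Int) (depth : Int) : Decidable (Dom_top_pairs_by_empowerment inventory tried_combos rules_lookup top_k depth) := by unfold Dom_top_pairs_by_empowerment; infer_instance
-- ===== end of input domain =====

-- B builds an element → incident-rule-outputs index once and expands each BFS layer as a staged
-- gather-then-dedup pass over that index instead of A's per-element rescan of the whole ruleset
-- (objective: alternative; same return value).
-- The dict parameter arrives as a flattened association list; both ports first
-- regroup it into key/value pairs (pvRulesOf) — that is marshalling, not algorithm.
def pvRulesOf (rules_lookup : List (String × String × List String)) : PySem.Dict (String × String) (List String) :=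
  ⟨rules_lookup.map (fun r => ((r.1, r.2.1), r.2.2))⟩

-- ===== PORT A =====
-- _canon_pair(a, b): strip both, tuple(sorted((a, b)))
def pvCanonA (a b : String) : String × String :=
  let a' := PySem.Str.strip a
  let b' := PySem.Str.strip b
  match PySem.List.sorted [a', b'] (fun x => x) false with
  | [x, y] => (x, y)
  | _ => (a', b')          -- unreachable: sorted of a 2-list has 2 elements

-- 'if r not in seen: seen.add(r); nxt.append(r)'
def pvAddNewA (sn : PySem.Set String × List String) (r : String) : PySem.Set String × List String :=
  if PySem.Set.contains sn.1 r then sn else (PySem.Set.add sn.1 r, sn.2 ++ [r])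

-- one popped frontier element x: 'for (a,b), outs in rules_lookup.items(): if x in (a,b): …'
def pvStepA (rules : PySem.Dict (String × String) (List String))
    (sn : PySem.Set String × List String) (x : String) : PySem.Set String × List String :=
  rules.items.foldl (fun sn kv =>
    if x == kv.1.1 || x == kv.1.2 then kv.2.foldl pvAddNewA sn else sn) sn

-- 'for _ in range(depth-1): … if not nxt: break; frontier = deque(nxt)'
def pvLoopA (rules : PySem.Dict (String × String) (List String)) :
    Nat → PySem.Set String → List String → PySem.Set String
  | 0, seen, _ => seen
  | fuel + 1, seen, frontier =>
      let sn := frontier.foldl (pvStepA rules) (seen, [])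
      if sn.2 = [] then sn.1 else pvLoopA rules fuel sn.1 sn.2

def pvPairEmpowermentA (pair : String × String) (inv_set : PySem.Set String)
    (rules : PySem.Dict (String × String) (List String)) (depth : Int) : Int :=
  match PySem.Dict.get? rules pair with
  | none => 0
  | some outs =>
    let start_new := outs.filter (fun x => !(PySem.Set.contains inv_set x))
    if depth ≤ 1 then (start_new.length : Int)
    else
      let seen := PySem.Set.union inv_set (PySem.Set.ofList start_new)
      let seen := pvLoopA rules (depth - 1).toNat seen start_new
      max 0 ((seen.length : Int) - (inv_set.length : Int))

-- the nested index loops building 'scored'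
def pvScoredA (inv : List String) (tried : PySem.Set (String × String))
    (inv_set : PySem.Set String) (rules : PySem.Dict (String × String) (List String))
    (depth : Int) : List (Int × (String × String)) :=
  (PySem.List.pyRange 0 (inv.length : Int) 1).foldl (fun acc i =>
    (PySem.List.pyRange (i + 1) (inv.length : Int) 1).foldl (fun acc j =>
      let p := pvCanonA (PySem.List.pyGetD inv i "") (PySem.List.pyGetD inv j "")
      if PySem.Set.contains tried p then acc
      else
        let s := pvPairEmpowermentA p inv_set rules depth
        if 0 < s then acc ++ [(s, p)] else acc) acc) []

def top_pairs_by_empowerment (inventory : List String) (tried_combos : List (String × String)) (rules_lookup : List (String × String × List String)) (top_k : Int) (depth : Int) : List (String × String) :=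
  let inv := inventory
  let tried := PySem.Set.ofList tried_combos
  let inv_set := PySem.Set.ofList inv
  let rules := pvRulesOf rules_lookup
  let scored := pvScoredA inv tried inv_set rules depth
  let scoredSorted := PySem.List.sorted scored (fun t => t.1) true
  (PySem.List.slice scoredSorted none (some top_k)).map (fun t => t.2)

-- ===== PORT B =====
-- 'incident.setdefault(k, []).append(outs)'
def pvBucketAdd (d : PySem.Dict String (List (List String)))
    (k : String) (outs : List String) : PySem.Dict String (List (List String)) :=
  PySem.Dict.insert d k (PySem.Dict.getD d k [] ++ [outs])

def pvIncStep (d : PySem.Dict String (List (List String)))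
    (kv : (String × String) × List String) : PySem.Dict String (List (List String)) :=
  let d := pvBucketAdd d kv.1.1 kv.2
  if kv.1.2 == kv.1.1 then d else pvBucketAdd d kv.1.2 kv.2

-- element -> result lists of its incident rules
def pvIncident (rules : PySem.Dict (String × String) (List String)) :
    PySem.Dict String (List (List String)) :=
  rules.items.foldl pvIncStep PySem.Dict.empty

-- 'flat = [r for x in frontier for outs2 in incident.get(x, []) for r in outs2]'
def pvFlatB (incident : PySem.Dict String (List (List String))) (frontier : List String) : List String :=
  frontier.flatMap (fun x => (PySem.Dict.getD incident x []).flatMap (fun outs2 => outs2))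

-- 'layer = []; for r in flat: if r not in seen and r not in layer: layer.append(r)'
def pvLayerB (seen : PySem.Set String) (flat : List String) : List String :=
  flat.foldl (fun layer r =>
    if !(PySem.Set.contains seen r) && !(layer.contains r) then layer ++ [r] else layer) []

-- 'while steps > 0 and frontier: flat…; layer…; seen |= set(layer); frontier = layer'
def pvLoopB (incident : PySem.Dict String (List (List String))) :
    Nat → PySem.Set String → List String → PySem.Set String
  | 0, seen, _ => seen
  | steps + 1, seen, frontier =>
      if frontier = [] then seen
      else
        let layer := pvLayerB seen (pvFlatB incident frontier)
        pvLoopB incident steps (PySem.Set.union seen layer) layer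

def pvEmpowermentB (p : String × String) (inv_set : PySem.Set String)
    (rules : PySem.Dict (String × String) (List String))
    (incident : PySem.Dict String (List (List String))) (depth : Int) : Int :=
  match PySem.Dict.get? rules p with
  | none => 0
  | some outs =>
    let start := outs.filter (fun x => !(PySem.Set.contains inv_set x))
    if depth ≤ 1 then (start.length : Int)
    else
      let seen := pvLoopB incident (depth - 1).toNat
        (PySem.Set.union inv_set (PySem.Set.ofList start)) start
      (seen.length : Int) - (inv_set.length : Int)

-- 'for i, x in enumerate(inv): for y in inv[i+1:]: … p = (min(a,b), max(a,b)) …'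
def pvScoredB (inv : List String) (tried : PySem.Set (String × String))
    (inv_set : PySem.Set String) (rules : PySem.Dict (String × String) (List String))
    (incident : PySem.Dict String (List (List String))) (depth : Int) :
    List (Int × (String × String)) :=
  (PySem.List.enumerate inv 0).foldl (fun acc ix =>
    (PySem.List.slice inv (some (ix.1 + 1)) none).foldl (fun acc y =>
      let a := PySem.Str.strip ix.2
      let b := PySem.Str.strip y
      let p := ((if a ≤ b then a else b), (if b ≤ a then a else b))
      if !(PySem.Set.contains tried p) then
        let s := pvEmpowermentB p inv_set rules incident depth
        if 0 < s then acc ++ [(s, p)] else acc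
      else acc) acc) []

def top_pairs_by_empowerment_alt (inventory : List String) (tried_combos : List (String × String)) (rules_lookup : List (String × String × List String)) (top_k : Int) (depth : Int) : List (String × String) :=
  let inv := inventory
  let inv_set := PySem.Set.ofList inv
  let tried := PySem.Set.ofList tried_combos
  let rules := pvRulesOf rules_lookup
  let incident := pvIncident rules
  let scored := pvScoredB inv tried inv_set rules incident depth
  let scoredSorted := PySem.List.sorted scored (fun t => -t.1) false
  (PySem.List.slice scoredSorted none (some top_k)).map (fun t => t.2)

-- ===== PRECONDITION & SPEC =====
def Spec_top_pairs_by_empowerment (inventory : List String) (tried_combos : List (String × String)) (rules_lookup : List (String × String × List String)) (top_k : Int) (depth : Int) (out : List (String × String)) : Prop := out = top_pairs_by_empowerment_alt inventory tried_combos rules_lookup top_k depth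
instance (inventory : List String) (tried_combos : List (String × String)) (rules_lookup : List (String × String × List String)) (top_k : Int) (depth : Int) (out : List (String × String)) : Decidable (Spec_top_pairs_by_empowerment inventory tried_combos rules_lookup top_k depth out) := by unfold Spec_top_pairs_by_empowerment; infer_instance

-- ===== CLAIM (what is proved, stated in full; the proofs are below) =====
def Claim_equal_top_pairs_by_empowerment : Prop := ∀ (inventory : List String) (tried_combos : List (String × String)) (rules_lookup : List (String × String × List String)) (top_k : Int) (depth : Int), Dom_top_pairs_by_empowerment inventory tried_combos rules_lookup top_k depth → Spec_top_pairs_by_empowerment inventory tried_combos rules_lookup top_k depth (top_pairs_by_empowerment inventory tried_combos rules_lookup top_k depth)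

-- ===== LEMMAS AND PROOFS =====

-- sorted((a, b)) on two strings is the ≤-ordered pair
theorem pv_sorted_pair (a b : String) :
    PySem.List.sorted [a, b] (fun x => x) false = if a ≤ b then [a, b] else [b, a] := by
  split_ifs with h
  · exact PySem.List.sorted_id_eq_of_perm_of_pairwise _ _ (List.Perm.refl _)
      (by simp [String.le_iff_toList_le.mp h])
  · exact PySem.List.sorted_id_eq_of_perm_of_pairwise _ _ (List.Perm.swap _ _ _)
      (by simp [String.le_iff_toList_le.mp (le_of_lt (lt_of_not_ge h))])

theorem pv_canon_eq (a b : String) :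
    pvCanonA a b =
      (if PySem.Str.strip a ≤ PySem.Str.strip b
       then (PySem.Str.strip a, PySem.Str.strip b)
       else (PySem.Str.strip b, PySem.Str.strip a)) := by
  simp only [pvCanonA]
  rw [pv_sorted_pair]
  split_ifs <;> rfl

-- B's (min, max) pair is A's sorted pair
theorem pv_minmax_eq (a b : String) :
    ((if a ≤ b then a else b), (if b ≤ a then a else b)) =
      (if a ≤ b then (a, b) else (b, a)) := by
  by_cases hab : a ≤ b
  · by_cases hba : b ≤ a
    · have : a = b := le_antisymm hab hba
      simp [this]
    · simp [hab, hba]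
  · have hba : b ≤ a := (le_total a b).resolve_left hab
    simp [hab, hba]

theorem pv_bucket_step (d : PySem.Dict String (List (List String)))
    (kv : (String × String) × List String) (x : String) :
    PySem.Dict.getD (pvIncStep d kv) x [] =
      PySem.Dict.getD d x [] ++ (if x == kv.1.1 || x == kv.1.2 then [kv.2] else []) := by
  simp only [pvIncStep, pvBucketAdd]
  by_cases hba : kv.1.2 = kv.1.1
  · simp only [hba, beq_self_eq_true, if_true]
    rw [PySem.Dict.getD_insert]
    by_cases hxa : x = kv.1.1 <;> simp [hxa]
  · simp only [beq_iff_eq, hba, if_false]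
    rw [PySem.Dict.getD_insert, PySem.Dict.getD_insert]
    by_cases hxb : x = kv.1.2
    · simp [hxb, hba]
    · by_cases hxa : x = kv.1.1
      · subst hxa
        rw [PySem.Dict.getD_insert, if_pos rfl]
        simp [hxb]
      · rw [PySem.Dict.getD_insert]
        simp [hxa, hxb]

theorem pv_bucket (rs : List ((String × String) × List String))
    (d : PySem.Dict String (List (List String))) (x : String) :
    PySem.Dict.getD (rs.foldl pvIncStep d) x [] =
      PySem.Dict.getD d x [] ++ (rs.filter (fun kv => x == kv.1.1 || x == kv.1.2)).map (fun kv => kv.2) := by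
  induction rs generalizing d with
  | nil => simp
  | cons kv rs ih =>
    simp only [List.foldl_cons, List.filter_cons]
    rw [ih, pv_bucket_step]
    by_cases h : (x == kv.1.1 || x == kv.1.2) = true <;> simp [h]

theorem pv_incident_getD (rules : PySem.Dict (String × String) (List String)) (x : String) :
    PySem.Dict.getD (pvIncident rules) x [] =
      (rules.items.filter (fun kv => x == kv.1.1 || x == kv.1.2)).map (fun kv => kv.2) := by
  unfold pvIncident
  rw [pv_bucket]
  rfl

-- A's per-element scan over all rules equals a fold of pvAddNewA over B's flat candidate list
theorem pv_stepA_as_flat (rules : PySem.Dict (String × String) (List String))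
    (sn : PySem.Set String × List String) (x : String) :
    pvStepA rules sn x =
      ((PySem.Dict.getD (pvIncident rules) x []).flatMap (fun outs2 => outs2)).foldl pvAddNewA sn := by
  unfold pvStepA
  rw [pv_incident_getD, List.flatMap_map, List.foldl_flatMap]
  exact PySem.List.foldl_if_eq_foldl_filter (fun kv => x == kv.1.1 || x == kv.1.2)
    (fun sn kv => List.foldl pvAddNewA sn kv.2) rules.items sn

-- the running layer of B's dedup pass, started from an arbitrary partial layer
def pvLayerAux (seen : PySem.Set String) (layer : List String) (flat : List String) : List String :=
  flat.foldl (fun layer r =>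
    if !(PySem.Set.contains seen r) && !(layer.contains r) then layer ++ [r] else layer) layer

theorem pv_layerB_eq_aux (seen : PySem.Set String) (flat : List String) :
    pvLayerB seen flat = pvLayerAux seen [] flat := rfl

-- invariant tying A's (seen, nxt) fold to B's gather-then-dedup layer
theorem pv_fold_addNew (seen : PySem.Set String) :
    ∀ (flat layer : List String),
      flat.foldl pvAddNewA (seen ++ layer, layer) =
        (seen ++ pvLayerAux seen layer flat, pvLayerAux seen layer flat) := by
  intro flat
  induction flat with
  | nil => intro layer; rfl
  | cons r flat ih =>
    intro layer
    by_cases hs : r ∈ seen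
    · have h1 : pvAddNewA (seen ++ layer, layer) r = (seen ++ layer, layer) := by
        simp [pvAddNewA, PySem.Set.contains, hs]
      have h2 : pvLayerAux seen layer (r :: flat) = pvLayerAux seen layer flat := by
        simp [pvLayerAux, PySem.Set.contains, hs]
      rw [List.foldl_cons, h1, h2]
      exact ih layer
    · by_cases hl : r ∈ layer
      · have h1 : pvAddNewA (seen ++ layer, layer) r = (seen ++ layer, layer) := by
          simp [pvAddNewA, PySem.Set.contains, hl]
        have h2 : pvLayerAux seen layer (r :: flat) = pvLayerAux seen layer flat := by
          simp [pvLayerAux, PySem.Set.contains, hl]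
        rw [List.foldl_cons, h1, h2]
        exact ih layer
      · have h1 : pvAddNewA (seen ++ layer, layer) r = (seen ++ (layer ++ [r]), layer ++ [r]) := by
          simp [pvAddNewA, PySem.Set.add, PySem.Set.contains, hs, hl]
        have h2 : pvLayerAux seen layer (r :: flat) = pvLayerAux seen (layer ++ [r]) flat := by
          simp [pvLayerAux, PySem.Set.contains, hs, hl]
        rw [List.foldl_cons, h1, h2]
        exact ih (layer ++ [r])

-- the layer never repeats an element and never contains a seen one
theorem pv_layerAux_inv (seen : PySem.Set String) :
    ∀ (flat layer : List String), layer.Nodup → (∀ r ∈ layer, PySem.Set.contains seen r = false) →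
      (pvLayerAux seen layer flat).Nodup ∧
        (∀ r ∈ pvLayerAux seen layer flat, PySem.Set.contains seen r = false) := by
  intro flat
  induction flat with
  | nil => intro layer h1 h2; exact ⟨h1, h2⟩
  | cons r flat ih =>
    intro layer h1 h2
    by_cases hs : r ∈ seen
    · have hstep : pvLayerAux seen layer (r :: flat) = pvLayerAux seen layer flat := by
        simp [pvLayerAux, PySem.Set.contains, hs]
      rw [hstep]
      exact ih layer h1 h2
    · by_cases hl : r ∈ layer
      · have hstep : pvLayerAux seen layer (r :: flat) = pvLayerAux seen layer flat := by
          simp [pvLayerAux, PySem.Set.contains, hl]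
        rw [hstep]
        exact ih layer h1 h2
      · have hstep : pvLayerAux seen layer (r :: flat) = pvLayerAux seen (layer ++ [r]) flat := by
          simp [pvLayerAux, PySem.Set.contains, hs, hl]
        rw [hstep]
        have h1' : (layer ++ [r]).Nodup := by
          rw [List.nodup_append]
          refine ⟨h1, List.nodup_singleton r, ?_⟩
          intro a ha b hb
          simp only [List.mem_singleton] at hb
          exact fun h => hl ((hb ▸ h) ▸ ha)
        have h2' : ∀ s ∈ layer ++ [r], PySem.Set.contains seen s = false := by
          intro s hsmem
          rcases List.mem_append.mp hsmem with h | h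
          · exact h2 s h
          · simp only [List.mem_singleton] at h
            subst h
            simpa [PySem.Set.contains] using hs
        exact ih (layer ++ [r]) h1' h2'

-- 'seen |= set(layer)' is plain concatenation for a fresh nodup layer
theorem pv_union_layer (seen : PySem.Set String) (flat : List String) :
    PySem.Set.union seen (pvLayerB seen flat) = seen ++ pvLayerB seen flat := by
  obtain ⟨hnd, hfresh⟩ := pv_layerAux_inv seen flat [] (by simp) (by simp)
  rw [pv_layerB_eq_aux]
  unfold PySem.Set.union
  rw [PySem.Set.update_eq_append_filter,
    PySem.Set.ofList_eq_self_of_nodup _ hnd, List.filter_eq_self.mpr]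
  intro r hr
  simpa using hfresh r hr

-- one whole layer round of A equals B's staged gather+dedup round
theorem pv_round_eq (rules : PySem.Dict (String × String) (List String))
    (seen : PySem.Set String) (frontier : List String) :
    frontier.foldl (pvStepA rules) (seen, []) =
      (PySem.Set.union seen (pvLayerB seen (pvFlatB (pvIncident rules) frontier)),
        pvLayerB seen (pvFlatB (pvIncident rules) frontier)) := by
  have h1 : frontier.foldl (pvStepA rules) (seen, ([] : List String)) =
      (pvFlatB (pvIncident rules) frontier).foldl pvAddNewA (seen, []) := by
    unfold pvFlatB
    rw [List.foldl_flatMap]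
    apply PySem.List.foldl_congr_mem
    intro acc x _
    exact pv_stepA_as_flat rules acc x
  have h2 := pv_fold_addNew seen (pvFlatB (pvIncident rules) frontier) []
  rw [List.append_nil] at h2
  rw [h1, h2, pv_union_layer]
  rfl

theorem pv_loopB_nil (incident : PySem.Dict String (List (List String)))
    (f : Nat) (seen : PySem.Set String) : pvLoopB incident f seen [] = seen := by
  cases f <;> simp [pvLoopB]

theorem pv_loop_eq (rules : PySem.Dict (String × String) (List String)) (f : Nat)
    (seen : PySem.Set String) (frontier : List String) :
    pvLoopA rules f seen frontier = pvLoopB (pvIncident rules) f seen frontier := by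
  induction f generalizing seen frontier with
  | zero => rfl
  | succ f ih =>
    by_cases hf : frontier = []
    · subst hf
      simp [pvLoopA, pvLoopB]
    · have hA : pvLoopA rules (f + 1) seen frontier =
        (if pvLayerB seen (pvFlatB (pvIncident rules) frontier) = []
         then PySem.Set.union seen (pvLayerB seen (pvFlatB (pvIncident rules) frontier))
         else pvLoopA rules f
           (PySem.Set.union seen (pvLayerB seen (pvFlatB (pvIncident rules) frontier)))
           (pvLayerB seen (pvFlatB (pvIncident rules) frontier))) := by
        simp only [pvLoopA]
        rw [pv_round_eq]
      rw [hA]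
      simp only [pvLoopB, if_neg hf]
      by_cases hn : pvLayerB seen (pvFlatB (pvIncident rules) frontier) = []
      · rw [if_pos hn, hn, pv_loopB_nil]
      · rw [if_neg hn, ih]

theorem pv_len_addNew (sn : PySem.Set String × List String) (r : String) :
    sn.1.length ≤ (pvAddNewA sn r).1.length := by
  unfold pvAddNewA PySem.Set.add
  split_ifs <;> simp

theorem pv_len_foldl_addNew (l : List String) (sn : PySem.Set String × List String) :
    sn.1.length ≤ (l.foldl pvAddNewA sn).1.length := by
  induction l generalizing sn with
  | nil => simp
  | cons r l ih => exact le_trans (pv_len_addNew sn r) (ih _)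

theorem pv_len_stepA (rules : PySem.Dict (String × String) (List String))
    (sn : PySem.Set String × List String) (x : String) :
    sn.1.length ≤ (pvStepA rules sn x).1.length := by
  unfold pvStepA
  generalize rules.items = rs
  induction rs generalizing sn with
  | nil => simp
  | cons kv rs ih =>
    simp only [List.foldl_cons]
    split_ifs with h
    · exact le_trans (pv_len_foldl_addNew kv.2 sn) (by simpa using ih _)
    · simpa using ih sn

theorem pv_len_foldl_stepA (rules : PySem.Dict (String × String) (List String))
    (frontier : List String) (sn : PySem.Set String × List String) :
    sn.1.length ≤ (frontier.foldl (pvStepA rules) sn).1.length := by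
  induction frontier generalizing sn with
  | nil => simp
  | cons x l ih => exact le_trans (pv_len_stepA rules sn x) (ih _)

theorem pv_len_loopA (rules : PySem.Dict (String × String) (List String)) (f : Nat)
    (seen : PySem.Set String) (frontier : List String) :
    seen.length ≤ (pvLoopA rules f seen frontier).length := by
  induction f generalizing seen frontier with
  | zero => simp [pvLoopA]
  | succ f ih =>
    simp only [pvLoopA]
    have h1 : seen.length ≤ (frontier.foldl (pvStepA rules) (seen, [])).1.length :=
      pv_len_foldl_stepA rules frontier (seen, [])
    split_ifs with h
    · exact h1
    · exact le_trans h1 (ih _ _)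

theorem pv_emp_eq (p : String × String) (inv_set : PySem.Set String)
    (rules : PySem.Dict (String × String) (List String)) (depth : Int) :
    pvPairEmpowermentA p inv_set rules depth =
      pvEmpowermentB p inv_set rules (pvIncident rules) depth := by
  unfold pvPairEmpowermentA pvEmpowermentB
  cases h : PySem.Dict.get? rules p with
  | none => rfl
  | some outs =>
    simp only []
    split_ifs with hd
    · rfl
    · rw [pv_loop_eq]
      have h0 : inv_set.length ≤
          (PySem.Set.union inv_set
            (PySem.Set.ofList (outs.filter (fun x => !(PySem.Set.contains inv_set x))))).length := by
        unfold PySem.Set.union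
        rw [PySem.Set.update_eq_append_filter]
        simp
      have h1 := pv_len_loopA rules (depth - 1).toNat
        (PySem.Set.union inv_set
          (PySem.Set.ofList (outs.filter (fun x => !(PySem.Set.contains inv_set x)))))
        (outs.filter (fun x => !(PySem.Set.contains inv_set x)))
      rw [pv_loop_eq] at h1
      omega

theorem pv_scored_eq (inv : List String) (tried : PySem.Set (String × String))
    (inv_set : PySem.Set String) (rules : PySem.Dict (String × String) (List String))
    (depth : Int) :
    pvScoredA inv tried inv_set rules depth =
      pvScoredB inv tried inv_set rules (pvIncident rules) depth := by
  unfold pvScoredA pvScoredB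
  rw [PySem.List.enumerate_eq_map_pyRange inv "", List.foldl_map]
  apply PySem.List.foldl_congr_mem
  intro acc i hi
  have hi0 : 0 ≤ i := (PySem.List.mem_pyRange_one.mp hi).1
  rw [PySem.List.slice_from inv (by omega : (0:Int) ≤ i + 1)]
  rw [PySem.List.foldl_pyRange_pyGetD' inv ""
    (fun acc y =>
      let p := pvCanonA (PySem.List.pyGetD inv i "") y
      if PySem.Set.contains tried p then acc
      else
        let s := pvPairEmpowermentA p inv_set rules depth
        if 0 < s then acc ++ [(s, p)] else acc) acc (by omega : (0:Int) ≤ i + 1)]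
  apply PySem.List.foldl_congr_mem
  intro acc2 y _
  simp only [pv_canon_eq, pv_minmax_eq, pv_emp_eq]
  by_cases hc : PySem.Set.contains tried
      (if PySem.Str.strip (PySem.List.pyGetD inv i "") ≤ PySem.Str.strip y
       then (PySem.Str.strip (PySem.List.pyGetD inv i ""), PySem.Str.strip y)
       else (PySem.Str.strip y, PySem.Str.strip (PySem.List.pyGetD inv i ""))) = true
  · simp only [hc, Bool.not_true, Bool.false_eq_true, if_true, if_false]
  · simp only [hc, Bool.not_false, Bool.false_eq_true, if_true, if_false]

-- sort(key=t.1, reverse=True) = sort(key=-t.1): both insert by the same Bool comparison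
theorem pv_sort_negkey (l : List (Int × (String × String))) :
    PySem.List.sorted l (fun t => t.1) true = PySem.List.sorted l (fun t => -t.1) false := by
  rw [PySem.List.sorted_rev_eq_foldl_insertBy, PySem.List.sorted_eq_foldl_insertBy]
  have h : (fun (a b : Int × (String × String)) => decide (b.1 < a.1)) =
      (fun (a b : Int × (String × String)) => decide (-a.1 < -b.1)) := by
    funext a b
    simp
  rw [h]

-- ===== VERDICT (by name: the statement is the Claim_ definition above) =====
theorem top_pairs_by_empowerment_spec : Claim_equal_top_pairs_by_empowerment := by
  intro inventory tried_combos rules_lookup top_k depth _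
  unfold Spec_top_pairs_by_empowerment
  simp only [top_pairs_by_empowerment, top_pairs_by_empowerment_alt, pv_scored_eq, pv_sort_negkey]
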